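-- pv_equiv track=rewrite | github.com/ivannarodriguez/CS-108 | lab07/validation.py | sum_of_double_evens
-- ===== SOURCE A (Python) =====
-- def sum_of_double_evens(cc):
--     reverse=cc[::-1]
--     evenlist=[]
--     doubledevens=[]
--     finallist= []
--     for idx in range(len(reverse)):
--         if idx%2==0:
--             evenlist.append(int(cc[idx]))
--     for idx in evenlist:
--         doubleidx= idx+idx
--         doubledevens.append(doubleidx)
--     for idx in doubledevens:
--
--         if idx>=10:
--             idx=idx-9
--             finallist.append(idx)
--         else:
--             finallist.append(idx)
--
--     return sum(finallist)
-- ===== SOURCE B (Python) =====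
-- def sum_of_double_evens(cc):
--     # One pass over the even-index characters (iterator skipping every other
--     # char), maintaining a running doubled-sum and a count of doubled digits
--     # >= 10; casting out nines is the algebraic correction s - 9*k.
--     s = 0
--     k = 0
--     it = iter(cc)
--     for ch in it:
--         d = 2 * int(ch)
--         s += d
--         if d >= 10:
--             k += 1
--         next(it, None)
--     return s - 9 * k
-- ===== Notes on version B (the rewrite author's own statement) =====
-- stated objective: simpler
-- what changed: Replaces A's three list-building passes (collect even-index digits via an index loop, double them into a second list, cast-out-nines into a third, then sum) with a single pass over every other character that maintains just a running doubled-sum and a count of doubled digits >= 10, returning s - 9*k.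
import Mathlib
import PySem

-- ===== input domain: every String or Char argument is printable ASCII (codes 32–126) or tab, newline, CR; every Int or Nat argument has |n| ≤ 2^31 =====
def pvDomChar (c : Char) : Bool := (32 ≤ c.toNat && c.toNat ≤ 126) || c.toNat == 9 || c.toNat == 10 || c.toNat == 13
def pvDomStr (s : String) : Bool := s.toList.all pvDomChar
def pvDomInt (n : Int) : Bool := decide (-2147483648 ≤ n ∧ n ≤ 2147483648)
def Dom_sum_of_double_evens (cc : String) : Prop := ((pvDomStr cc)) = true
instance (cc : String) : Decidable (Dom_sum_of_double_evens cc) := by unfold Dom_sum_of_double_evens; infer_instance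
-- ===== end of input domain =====

-- B replaces A's three list-building passes with one pass over every other
-- character maintaining a doubled-sum and an over-ten count (simpler; same O(n)).

-- int(ch) for a one-character string (Pre_ guarantees it parses)
def pvDigit (c : Char) : Int := (PySem.Int.ofChars? [c]).getD 0

-- ===== PORT A =====
def sum_of_double_evens (cc : String) : Int :=
  let l := cc.toList
  let reverse := (PySem.List.slice? l none none (-1)).getD []      -- cc[::-1]
  let evenlist : List Int :=
    (PySem.List.pyRange 0 (reverse.length : Int) 1).foldl
      (fun acc idx =>
        if PySem.Int.mod idx 2 = 0 then acc ++ [pvDigit (PySem.List.pyGetD l idx ' ')]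
        else acc) []
  let doubledevens : List Int := evenlist.foldl (fun acc idx => acc ++ [idx + idx]) []
  let finallist : List Int :=
    doubledevens.foldl (fun acc idx => if idx ≥ 10 then acc ++ [idx - 9] else acc ++ [idx]) []
  finallist.sum

-- ===== PORT B =====
-- Source B's loop: consume the iterator two characters at a time, keeping (s, k)
def pvAltGo : List Char → Int → Int → Int
  | [], s, k => s - 9 * k
  | [c], s, k =>
      let d := 2 * pvDigit c
      (s + d) - 9 * (k + if d ≥ 10 then 1 else 0)
  | c :: _ :: rest, s, k =>
      let d := 2 * pvDigit c
      pvAltGo rest (s + d) (k + if d ≥ 10 then 1 else 0)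

def sum_of_double_evens_alt (cc : String) : Int :=
  pvAltGo cc.toList 0 0

-- ===== PRECONDITION & SPEC =====
-- the characters at even indices of cc (what A's index loop reads)
def pvEvenChars : List Char → List Char
  | [] => []
  | [c] => [c]
  | c :: _ :: rest => c :: pvEvenChars rest

-- Pre_: every even-index character parses as an int (else Python A raises ValueError)
def Pre_sum_of_double_evens (cc : String) : Prop :=
  ((pvEvenChars cc.toList).all (fun c => (PySem.Int.ofChars? [c]).isSome)) = true
instance (cc : String) : Decidable (Pre_sum_of_double_evens cc) := by
  unfold Pre_sum_of_double_evens; infer_instance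

def pvWitness_sum_of_double_evens : String := "59"

def Spec_sum_of_double_evens (cc : String) (out : Int) : Prop := out = sum_of_double_evens_alt cc
instance (cc : String) (out : Int) : Decidable (Spec_sum_of_double_evens cc out) := by unfold Spec_sum_of_double_evens; infer_instance

-- ===== CLAIM (what is proved, stated in full; the proofs are below) =====
def Claim_equal_sum_of_double_evens : Prop := ∀ (cc : String), Dom_sum_of_double_evens cc → Pre_sum_of_double_evens cc → Spec_sum_of_double_evens cc (sum_of_double_evens cc)

-- ===== LEMMAS AND PROOFS =====

-- A's first loop collects exactly f of the even-index characters
theorem pv_even_fold (f : Char → Int) :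
    ∀ (l : List Char) (s : Int) (acc : List Int), 0 ≤ s → PySem.Int.mod s 2 = 0 →
      (PySem.List.enumerate l s).foldl
        (fun acc p => if PySem.Int.mod p.1 2 = 0 then acc ++ [f p.2] else acc) acc
      = acc ++ (pvEvenChars l).map f := by
  intro l
  induction l using pvEvenChars.induct with
  | case1 =>
      intro s acc _ _
      simp [PySem.List.enumerate_nil, pvEvenChars]
  | case2 c =>
      intro s acc _ hs
      simp [PySem.List.enumerate_cons, PySem.List.enumerate_nil, pvEvenChars]
      exact (PySem.Int.mod_eq_zero_iff_dvd s 2).mp hs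
  | case3 c c2 rest ih =>
      intro s acc hs0 hs
      have h2 : PySem.Int.mod (s + 1) 2 ≠ 0 := by
        rw [PySem.Int.mod_eq_emod_of_pos (by omega)] at hs ⊢
        omega
      have h3 : PySem.Int.mod (s + 1 + 1) 2 = 0 := by
        rw [PySem.Int.mod_eq_emod_of_pos (by omega)] at hs ⊢
        omega
      rw [PySem.List.enumerate_cons, PySem.List.enumerate_cons]
      simp only [List.foldl_cons, hs, if_pos, if_neg h2]
      rw [ih (s + 1 + 1) (acc ++ [f c]) (by omega) h3]
      simp [pvEvenChars]

-- B's loop computes s - 9k + the cast-out-nines sum of the even-index digits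
theorem pv_altGo_eq :
    ∀ (l : List Char) (s k : Int),
      pvAltGo l s k
      = s - 9 * k
        + ((pvEvenChars l).map
            (fun c => if 2 * pvDigit c ≥ 10 then 2 * pvDigit c - 9 else 2 * pvDigit c)).sum := by
  intro l
  induction l using pvEvenChars.induct with
  | case1 =>
      intro s k
      simp [pvAltGo, pvEvenChars]
  | case2 c =>
      intro s k
      by_cases h : 2 * pvDigit c ≥ 10 <;> simp [pvAltGo, pvEvenChars, h] <;> ring
  | case3 c c2 rest ih =>
      intro s k
      by_cases h : 2 * pvDigit c ≥ 10 <;>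
        simp [pvAltGo, pvEvenChars, h, ih] <;> ring

-- ===== VERDICT (by name: the statement is the Claim_ definition above) =====
theorem sum_of_double_evens_spec : Claim_equal_sum_of_double_evens := by
  intro cc _ _
  unfold Spec_sum_of_double_evens sum_of_double_evens sum_of_double_evens_alt
  set l := cc.toList with hl
  simp only [PySem.List.slice?_none_none_neg_one, Option.getD_some, List.length_reverse]
  -- first loop: even-index digits
  have h1 :
      (PySem.List.pyRange 0 (l.length : Int) 1).foldl
        (fun acc idx =>
          if PySem.Int.mod idx 2 = 0 then acc ++ [pvDigit (PySem.List.pyGetD l idx ' ')]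
          else acc) []
      = (pvEvenChars l).map pvDigit := by
    have he := PySem.List.enumerate_eq_map_pyRange (xs := l) (d := ' ')
    have := pv_even_fold pvDigit l 0 [] le_rfl (by decide)
    rw [he, List.foldl_map] at this
    simpa using this
  rw [h1, pv_altGo_eq]
  -- second loop: doubling
  rw [PySem.List.foldl_append_singleton_eq_map]
  -- third loop: cast out nines, then sum
  have h3 :
      ∀ (ds : List Int) (acc : List Int),
        ds.foldl (fun acc idx => if idx ≥ 10 then acc ++ [idx - 9] else acc ++ [idx]) acc
        = acc ++ ds.map (fun idx => if idx ≥ 10 then idx - 9 else idx) := by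
    intro ds
    induction ds with
    | nil => simp
    | cons d t ih =>
        intro acc
        by_cases h : d ≥ 10 <;> simp [h, ih]
  rw [h3]
  simp only [List.nil_append, List.map_map]
  rw [show (0:Int) - 9 * 0 = 0 from by ring, zero_add]
  congr 1
  apply List.map_congr_left
  intro c _
  simp only [Function.comp_apply]
  rw [two_mul (pvDigit c)]
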